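-- pv_equiv track=rewrite | github.com/2667383633-gif/myweb | generate_breast_lesion_prompt_bank.py | text_to_slots
-- ===== SOURCE A (Python) =====
-- from typing import Any, Dict, List, Optional
--
-- def text_to_slots(text: str, subtype: str, type_name: str) -> Dict[str, Optional[str]]:
--     low = text.lower()
--
--     pathology = None
--     morphology = None
--
--     if subtype == "benign":
--         if "mass" in low:
--             pathology = "benign breast mass"
--         elif "tumor" in low:
--             pathology = "benign tumor region"
--         else:
--             pathology = "benign breast lesion"
--     elif subtype == "malignant":
--         if "mass" in low:
--             pathology = "malignant breast mass"
--         elif "tumor" in low: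
--             pathology = "malignant tumor region"
--         else:
--             pathology = "malignant breast lesion"
--     else:
--         if "mass" in low:
--             pathology = "breast mass"
--         elif "tumor" in low:
--             pathology = "tumor region"
--         else:
--             pathology = "breast lesion"
--
--     morph_map = [
--         "oval shape", "round shape", "circumscribed margins", "smooth margins",
--         "parallel orientation", "posterior enhancement", "well-defined margins",
--         "wider-than-tall appearance", "irregular shape", "spiculated margins",
--         "angular margins", "non-parallel orientation", "posterior shadowing",
--         "ill-defined margins", "non-circumscribed borders", "taller-than-wide appearance",
--         "localized", "solid-appearing",
--     ]
--     found = [m for m in morph_map if m.split()[0] in low]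
--     morphology = ", ".join(found) if found else None
--
--     if type_name == "lesion_generic":
--         morphology = None
--         if subtype == "generic":
--             pathology = "breast lesion"
--
--     return {
--         "modality": "breast ultrasound",
--         "anatomy": None,
--         "pathology": pathology,
--         "morphology": morphology,
--         "location": None,
--     }
-- ===== SOURCE B (Python) =====
-- # B: one left-to-right scan of the text matches ALL keywords at once into a found-set;
-- # pathology and morphology are then pure membership lookups (no per-keyword substring searches).
-- MORPH = [
--     "oval shape", "round shape", "circumscribed margins", "smooth margins",
--     "parallel orientation", "posterior enhancement", "well-defined margins",
--     "wider-than-tall appearance", "irregular shape", "spiculated margins",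
--     "angular margins", "non-parallel orientation", "posterior shadowing",
--     "ill-defined margins", "non-circumscribed borders", "taller-than-wide appearance",
--     "localized", "solid-appearing",
-- ]
-- _KEYED = [(m.split()[0], m) for m in MORPH]
-- _PATTERNS = ["mass", "tumor"] + [k for k, _ in _KEYED]
--
--
-- def text_to_slots(text, subtype, type_name):
--     low = text.lower()
--     # single scan: at every position record each pattern that starts there
--     found = set()
--     for i in range(len(low)):
--         for p in _PATTERNS:
--             if p not in found and low.startswith(p, i):
--                 found.add(p)
--
--     if type_name == "lesion_generic" and subtype == "generic":
--         pathology = "breast lesion"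
--     else:
--         base = ("breast mass" if "mass" in found
--                 else "tumor region" if "tumor" in found
--                 else "breast lesion")
--         prefix = subtype + " " if subtype in ("benign", "malignant") else ""
--         pathology = prefix + base
--
--     if type_name == "lesion_generic":
--         morphology = None
--     else:
--         ms = [m for k, m in _KEYED if k in found]
--         morphology = ", ".join(ms) if ms else None
--
--     return {
--         "modality": "breast ultrasound",
--         "anatomy": None,
--         "pathology": pathology,
--         "morphology": morphology,
--         "location": None,
--     }
-- ===== Notes on version B (the rewrite author's own statement) =====
-- stated objective: alternative
-- what changed: B replaces A's per-keyword substring searches ('k in low' once per morphology term plus for 'mass'/'tumor') by a single left-to-right scan of the text that matches all 20 patterns at each position into a found-set; pathology and morphology are then computed from set membership alone, with pathology factored as prefix+base.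
import Mathlib
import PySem

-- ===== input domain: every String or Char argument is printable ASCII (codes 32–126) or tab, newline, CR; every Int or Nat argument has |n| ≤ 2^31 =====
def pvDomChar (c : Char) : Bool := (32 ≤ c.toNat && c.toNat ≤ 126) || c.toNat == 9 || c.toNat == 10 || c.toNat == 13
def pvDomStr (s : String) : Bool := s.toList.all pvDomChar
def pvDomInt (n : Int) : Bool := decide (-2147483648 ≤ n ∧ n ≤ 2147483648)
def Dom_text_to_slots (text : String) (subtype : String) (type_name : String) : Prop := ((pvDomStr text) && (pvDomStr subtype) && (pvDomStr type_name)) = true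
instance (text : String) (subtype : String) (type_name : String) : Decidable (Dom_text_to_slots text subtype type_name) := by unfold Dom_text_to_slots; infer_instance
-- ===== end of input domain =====

-- B matches all keywords in one positional scan of the text into a found-set and computes both slots from set membership (objective: alternative).

-- ===== PORT A =====
def morph_map : List String := [
  "oval shape", "round shape", "circumscribed margins", "smooth margins",
  "parallel orientation", "posterior enhancement", "well-defined margins",
  "wider-than-tall appearance", "irregular shape", "spiculated margins",
  "angular margins", "non-parallel orientation", "posterior shadowing",
  "ill-defined margins", "non-circumscribed borders", "taller-than-wide appearance",
  "localized", "solid-appearing"]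

def text_to_slots (text : String) (subtype : String) (type_name : String) : List (String × Option String) :=
  let low := PySem.Str.lower text
  let pathology :=
    if subtype == "benign" then
      if PySem.Str.isIn "mass" low then "benign breast mass"
      else if PySem.Str.isIn "tumor" low then "benign tumor region"
      else "benign breast lesion"
    else if subtype == "malignant" then
      if PySem.Str.isIn "mass" low then "malignant breast mass"
      else if PySem.Str.isIn "tumor" low then "malignant tumor region"
      else "malignant breast lesion"
    else
      if PySem.Str.isIn "mass" low then "breast mass"
      else if PySem.Str.isIn "tumor" low then "tumor region"
      else "breast lesion"
  let found := morph_map.filter (fun m => PySem.Str.isIn (PySem.List.pyGetD (PySem.Str.split₀ m) 0 "") low)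
  let morphology := if found ≠ [] then some (PySem.Str.join ", " found) else none
  let morphology := if type_name == "lesion_generic" then none else morphology
  let pathology :=
    if type_name == "lesion_generic" && subtype == "generic" then "breast lesion" else pathology
  [("modality", some "breast ultrasound"), ("anatomy", none),
   ("pathology", some pathology), ("morphology", morphology), ("location", none)]

-- ===== PORT B =====
def MORPH_B : List String := [
  "oval shape", "round shape", "circumscribed margins", "smooth margins",
  "parallel orientation", "posterior enhancement", "well-defined margins",
  "wider-than-tall appearance", "irregular shape", "spiculated margins",
  "angular margins", "non-parallel orientation", "posterior shadowing",
  "ill-defined margins", "non-circumscribed borders", "taller-than-wide appearance",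
  "localized", "solid-appearing"]

def KEYED_B : List (String × String) := MORPH_B.map (fun m => (PySem.List.pyGetD (PySem.Str.split₀ m) 0 "", m))

def PATTERNS_B : List String := ["mass", "tumor"] ++ KEYED_B.map Prod.fst

-- low.startswith(p, i) for 0 ≤ i ≤ len(low): exact (match at position i).
def startsAt (low : List Char) (p : String) (i : Nat) : Bool := p.toList.isPrefixOf (low.drop i)

def text_to_slots_alt (text : String) (subtype : String) (type_name : String) : List (String × Option String) :=
  let low := (PySem.Str.lower text).toList
  let found : PySem.Set String := (List.range low.length).foldl (fun acc i =>
      PATTERNS_B.foldl (fun acc p =>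
        if !(PySem.Set.contains acc p) && startsAt low p i then PySem.Set.add acc p else acc) acc)
    PySem.Set.empty
  let pathology :=
    if type_name == "lesion_generic" && subtype == "generic" then "breast lesion"
    else
      let base :=
        if PySem.Set.contains found "mass" then "breast mass"
        else if PySem.Set.contains found "tumor" then "tumor region"
        else "breast lesion"
      let pref := if subtype == "benign" || subtype == "malignant" then subtype ++ " " else ""
      pref ++ base
  let morphology :=
    if type_name == "lesion_generic" then none
    else
      let ms := (KEYED_B.filter (fun km => PySem.Set.contains found km.1)).map Prod.snd
      if ms ≠ [] then some (PySem.Str.join ", " ms) else none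
  [("modality", some "breast ultrasound"), ("anatomy", none),
   ("pathology", some pathology), ("morphology", morphology), ("location", none)]

-- ===== PRECONDITION & SPEC =====
def Spec_text_to_slots (text : String) (subtype : String) (type_name : String) (out : List (String × Option String)) : Prop := out = text_to_slots_alt text subtype type_name
instance (text : String) (subtype : String) (type_name : String) (out : List (String × Option String)) : Decidable (Spec_text_to_slots text subtype type_name out) := by unfold Spec_text_to_slots; infer_instance

-- ===== CLAIM (what is proved, stated in full; the proofs are below) =====
def Claim_equal_text_to_slots : Prop := ∀ (text : String) (subtype : String) (type_name : String), Dom_text_to_slots text subtype type_name → Spec_text_to_slots text subtype type_name (text_to_slots text subtype type_name)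

-- ===== LEMMAS AND PROOFS =====

-- The inner fold over the pattern list adds exactly the patterns matching at position i.
theorem mem_inner_fold (low : List Char) (i : Nat) (ps : List String) (acc : PySem.Set String) (p : String) :
    p ∈ (ps.foldl (fun acc q =>
        if !(PySem.Set.contains acc q) && startsAt low q i then PySem.Set.add acc q else acc) acc)
      ↔ p ∈ acc ∨ (p ∈ ps ∧ startsAt low p i = true) := by
  induction ps generalizing acc with
  | nil => simp
  | cons q t ih =>
    simp only [List.foldl_cons, ih, List.mem_cons]
    constructor
    · rintro (h | h)
      · by_cases hs : (!(PySem.Set.contains acc q) && startsAt low q i) = true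
        · rw [if_pos hs] at h
          rcases (PySem.Set.mem_add _ _ _).1 h with h' | h'
          · exact Or.inl h'
          · exact Or.inr ⟨Or.inl h', h' ▸ (Bool.and_eq_true _ _ ▸ hs).2⟩
        · rw [if_neg hs] at h; exact Or.inl h
      · exact Or.inr ⟨Or.inr h.1, h.2⟩
    · rintro (h | ⟨hq | ht, hst⟩)
      · left
        by_cases hs : (!(PySem.Set.contains acc q) && startsAt low q i) = true
        · rw [if_pos hs]; exact (PySem.Set.mem_add _ _ _).2 (Or.inl h)
        · rwa [if_neg hs]
      · left; subst hq
        by_cases hc : PySem.Set.contains acc p = true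
        · have hm := (PySem.Set.contains_iff _ _).1 hc
          by_cases hs : (!(PySem.Set.contains acc p) && startsAt low p i) = true
          · rw [if_pos hs]; exact (PySem.Set.mem_add _ _ _).2 (Or.inl hm)
          · rwa [if_neg hs]
        · have hc' : PySem.Set.contains acc p = false := Bool.eq_false_iff.2 hc
          have : (!(PySem.Set.contains acc p) && startsAt low p i) = true := by
            rw [hc', hst]; rfl
          rw [if_pos this]; exact (PySem.Set.mem_add _ _ _).2 (Or.inr rfl)
      · exact Or.inr ⟨ht, hst⟩

-- The full scan collects exactly the patterns that match at some position below n.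
theorem mem_scan (low : List Char) (n : Nat) (p : String) :
    p ∈ ((List.range n).foldl (fun acc i =>
        PATTERNS_B.foldl (fun acc q =>
          if !(PySem.Set.contains acc q) && startsAt low q i then PySem.Set.add acc q else acc) acc)
      PySem.Set.empty)
      ↔ p ∈ PATTERNS_B ∧ ∃ i < n, startsAt low p i = true := by
  induction n with
  | zero => simp [PySem.Set.empty]
  | succ n ih =>
    rw [List.range_succ, List.foldl_append, List.foldl_cons, List.foldl_nil, mem_inner_fold, ih]
    constructor
    · rintro (⟨hp, i, hi, h⟩ | ⟨hp, h⟩)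
      · exact ⟨hp, i, Nat.lt_succ_of_lt hi, h⟩
      · exact ⟨hp, n, Nat.lt_succ_self n, h⟩
    · rintro ⟨hp, i, hi, h⟩
      rcases Nat.lt_succ_iff_lt_or_eq.1 hi with hi' | hi'
      · exact Or.inl ⟨hp, i, hi', h⟩
      · exact Or.inr ⟨hp, hi' ▸ h⟩

-- A nonempty pattern matches at some in-range position iff it is a substring.
theorem exists_startsAt_iff (low : List Char) (p : String) (hp : p.toList ≠ []) :
    (∃ i < low.length, startsAt low p i = true) ↔ PySem.Chars.isIn p.toList low = true := by
  rw [← PySem.Chars.exists_prefix_drop_iff_isIn]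
  constructor
  · rintro ⟨i, _, h⟩
    exact ⟨i, List.isPrefixOf_iff_prefix.1 h⟩
  · rintro ⟨j, h⟩
    by_cases hj : j < low.length
    · exact ⟨j, hj, List.isPrefixOf_iff_prefix.2 h⟩
    · exfalso
      have : low.drop j = [] := List.drop_eq_nil_of_le (Nat.le_of_not_lt hj)
      rw [this] at h
      exact hp (List.prefix_nil.1 h)

-- Membership in the found-set of B's scan equals A's substring test, for every nonempty pattern.
theorem contains_scan_eq (low : List Char) (p : String) (hp : p ∈ PATTERNS_B) (hne : p.toList ≠ []) :
    PySem.Set.contains ((List.range low.length).foldl (fun acc i =>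
        PATTERNS_B.foldl (fun acc q =>
          if !(PySem.Set.contains acc q) && startsAt low q i then PySem.Set.add acc q else acc) acc)
      PySem.Set.empty) p = PySem.Chars.isIn p.toList low := by
  rw [Bool.eq_iff_iff, PySem.Set.contains_iff, mem_scan, ← exists_startsAt_iff low p hne]
  exact ⟨fun h => h.2, fun h => ⟨hp, h⟩⟩

-- Every pattern is nonempty.
theorem patterns_nonempty : ∀ p ∈ PATTERNS_B, p.toList ≠ [] := by decide

-- Filtering the (key, term) pairs by the key and projecting equals filtering the terms by their key.
theorem map_pair_filter {α β : Type} (f : α → β) (q : β → Bool) (ms : List α) :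
    ((ms.map (fun m => (f m, m))).filter (fun km => q km.1)).map Prod.snd
      = ms.filter (fun m => q (f m)) := by
  induction ms with
  | nil => rfl
  | cons m t ih =>
    simp only [List.map_cons, List.filter_cons]
    by_cases h : q (f m) <;> simp [h, ih]

-- ===== VERDICT helper =====
theorem text_to_slots_spec : Claim_equal_text_to_slots := by
  intro text subtype type_name _
  unfold Spec_text_to_slots
  simp only [text_to_slots, text_to_slots_alt]
  have hmass : ("mass" : String) ∈ PATTERNS_B := by decide
  have htumor : ("tumor" : String) ∈ PATTERNS_B := by decide
  rw [contains_scan_eq _ _ hmass (patterns_nonempty _ hmass),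
      contains_scan_eq _ _ htumor (patterns_nonempty _ htumor)]
  have hfilter : (KEYED_B.filter (fun km => PySem.Set.contains
      ((List.range (PySem.Str.lower text).toList.length).foldl (fun acc i =>
        PATTERNS_B.foldl (fun acc q =>
          if !(PySem.Set.contains acc q) && startsAt (PySem.Str.lower text).toList q i then PySem.Set.add acc q else acc) acc)
      PySem.Set.empty) km.1)).map Prod.snd
      = morph_map.filter (fun m => PySem.Str.isIn (PySem.List.pyGetD (PySem.Str.split₀ m) 0 "") (PySem.Str.lower text)) := by
    rw [List.filter_congr (fun km hkm => by
      have hp : km.1 ∈ PATTERNS_B := by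
        unfold PATTERNS_B
        exact List.mem_append_right _ (List.mem_map_of_mem hkm)
      rw [contains_scan_eq _ _ hp (patterns_nonempty _ hp)])]
    show ((MORPH_B.map _).filter _).map Prod.snd = _
    rw [map_pair_filter (fun m => PySem.List.pyGetD (PySem.Str.split₀ m) 0 "") (fun k => PySem.Chars.isIn k.toList (PySem.Str.lower text).toList) MORPH_B]
    simp [PySem.Str.isIn_eq, MORPH_B, morph_map]
  rw [hfilter]
  simp only [PySem.Str.isIn_eq]
  split_ifs <;> simp_all
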